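-- pv_equiv track=rewrite | github.com/claudlos/Kryptos | strategy1_quagmire.py | decrypt_quagmire
-- ===== SOURCE A (Python) =====
-- KRYPTOS_ALPHABET = "KRYPTOSABCDEFGHIJLMNQUVWXZ" # The standard Kryptos tableau alphabet
--
-- def build_tableau():
--     """Builds the Quagmire III tableau used in Kryptos."""
--     tableau = []
--     # In Kryptos, the alphabet is shifted for each row.
--     # Actually, K1/K2 used a standard Vigenere tableau but BOTH the row/col headers AND the grid were the KRYPTOS mixed alphabet.
--     for i in range(26):
--         row = KRYPTOS_ALPHABET[i:] + KRYPTOS_ALPHABET[:i]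
--         tableau.append(row)
--     return tableau
--
-- def decrypt_quagmire(ciphertext, key_string):
--     """
--     Decrypts ciphertext using Quagmire III with KRYPTOS alphabet and the given running key.
--     """
--     tableau = build_tableau()
--     plaintext = ""
--     for i, c in enumerate(ciphertext):
--         key_char = key_string[i % len(key_string)]
--
--         # Find row for key_char
--         row_idx = KRYPTOS_ALPHABET.index(key_char)
--         row = tableau[row_idx]
--
--         # Find ciphertext char in that row
--         if c in row:
--             col_idx = row.index(c)
--             # Plaintext is the column header
--             plaintext += KRYPTOS_ALPHABET[col_idx]
--         else:
--             plaintext += c # fallback for punctuation if any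
--     return plaintext
-- ===== SOURCE B (Python) =====
-- KRYPTOS_ALPHABET = "KRYPTOSABCDEFGHIJLMNQUVWXZ"
--
-- def decrypt_quagmire(ciphertext, key_string):
--     """
--     Decrypts ciphertext using Quagmire III with KRYPTOS alphabet and the given running key.
--     No tableau: row i of the tableau is the alphabet rotated left by i, so the
--     column of c in row r is (index(c) - r) mod 26.
--     """
--     out = []
--     for i, c in enumerate(ciphertext):
--         key_char = key_string[i % len(key_string)]
--         row_idx = KRYPTOS_ALPHABET.index(key_char)
--         if c in KRYPTOS_ALPHABET:
--             col_idx = (KRYPTOS_ALPHABET.index(c) - row_idx) % 26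
--             out.append(KRYPTOS_ALPHABET[col_idx])
--         else:
--             out.append(c)
--     return "".join(out)
-- ===== Notes on version B (the rewrite author's own statement) =====
-- stated objective: simpler
-- what changed: Drops the 26x26 tableau build and per-character row scan; computes the plaintext column directly as (index(c) - index(key_char)) mod 26 on the KRYPTOS alphabet, joining a list instead of repeated string concatenation.
import Mathlib
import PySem

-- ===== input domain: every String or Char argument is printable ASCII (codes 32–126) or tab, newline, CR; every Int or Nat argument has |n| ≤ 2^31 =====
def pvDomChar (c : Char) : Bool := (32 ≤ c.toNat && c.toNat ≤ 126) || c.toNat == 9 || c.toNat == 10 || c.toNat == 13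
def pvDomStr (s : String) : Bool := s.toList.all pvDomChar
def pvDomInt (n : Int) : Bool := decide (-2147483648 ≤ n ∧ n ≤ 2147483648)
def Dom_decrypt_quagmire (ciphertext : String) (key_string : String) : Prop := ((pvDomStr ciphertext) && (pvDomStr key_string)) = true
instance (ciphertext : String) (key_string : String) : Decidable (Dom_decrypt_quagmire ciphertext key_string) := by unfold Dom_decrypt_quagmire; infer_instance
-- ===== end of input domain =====

-- B replaces the 26x26 tableau build and per-row scan by the closed-form column (index(c) - index(key_char)) mod 26: simpler, no tableau.


-- The KRYPTOS tableau alphabet, as a list of characters.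
def pvKRY : List Char :=
  ['K','R','Y','P','T','O','S','A','B','C','D','E','F','G','H','I','J','L','M','N','Q','U','V','W','X','Z']

-- ===== PORT A =====
-- build_tableau(): row i is KRYPTOS_ALPHABET[i:] + KRYPTOS_ALPHABET[:i]
def pvTableau : List (List Char) :=
  (PySem.List.pyRange 0 26 1).map
    (fun i => PySem.List.slice pvKRY (some i) none ++ PySem.List.slice pvKRY none (some i))

-- one loop iteration of A; pyGetD/index?.getD defaults are only reached where Python raises (outside Pre_)
def pvStepA (key : List Char) (acc : List Char) (ic : Int × Char) : List Char :=
  let kc := PySem.List.pyGetD key (PySem.Int.mod ic.1 (key.length : Int)) ' '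
  let row_idx := (PySem.List.index? pvKRY kc).getD 0
  let row := PySem.List.pyGetD pvTableau ((row_idx : Nat) : Int) []
  if ic.2 ∈ row then
    acc ++ [PySem.List.pyGetD pvKRY (((PySem.List.index? row ic.2).getD 0 : Nat) : Int) ' ']
  else
    acc ++ [ic.2]

def decrypt_quagmire (ciphertext : String) (key_string : String) : String :=
  String.ofList ((PySem.List.enumerate ciphertext.toList).foldl (pvStepA key_string.toList) [])

-- ===== PORT B =====
-- one loop iteration of B: closed-form column index, no tableau
def pvStepB (key : List Char) (acc : List Char) (ic : Int × Char) : List Char :=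
  let kc := PySem.List.pyGetD key (PySem.Int.mod ic.1 (key.length : Int)) ' '
  let row_idx := (PySem.List.index? pvKRY kc).getD 0
  if ic.2 ∈ pvKRY then
    let col_idx := PySem.Int.mod (((PySem.List.index? pvKRY ic.2).getD 0 : Int) - (row_idx : Int)) 26
    acc ++ [PySem.List.pyGetD pvKRY col_idx ' ']
  else
    acc ++ [ic.2]

def decrypt_quagmire_alt (ciphertext : String) (key_string : String) : String :=
  String.ofList ((PySem.List.enumerate ciphertext.toList).foldl (pvStepB key_string.toList) [])

-- ===== PRECONDITION & SPEC =====
-- Pre_ excludes exactly the inputs where A raises: an empty key with nonempty ciphertext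
-- (ZeroDivisionError) and a used key character outside the KRYPTOS alphabet (ValueError); B raises there too.
def Pre_decrypt_quagmire (ciphertext : String) (key_string : String) : Prop :=
  ciphertext.toList = [] ∨
    (key_string.toList ≠ [] ∧
      ((key_string.toList.take ciphertext.toList.length).all (fun c => pvKRY.contains c)) = true)
instance (ciphertext : String) (key_string : String) : Decidable (Pre_decrypt_quagmire ciphertext key_string) := by unfold Pre_decrypt_quagmire; infer_instance

def pvWitness_decrypt_quagmire : String × String := ("OB", "KR")

def Spec_decrypt_quagmire (ciphertext : String) (key_string : String) (out : String) : Prop := out = decrypt_quagmire_alt ciphertext key_string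
instance (ciphertext : String) (key_string : String) (out : String) : Decidable (Spec_decrypt_quagmire ciphertext key_string out) := by unfold Spec_decrypt_quagmire; infer_instance

-- ===== CLAIM (what is proved, stated in full; the proofs are below) =====
def Claim_equal_decrypt_quagmire : Prop := ∀ (ciphertext : String) (key_string : String), Dom_decrypt_quagmire ciphertext key_string → Pre_decrypt_quagmire ciphertext key_string → Spec_decrypt_quagmire ciphertext key_string (decrypt_quagmire ciphertext key_string)

-- ===== LEMMAS AND PROOFS =====

-- row of the tableau for a valid row index is a rotation of the alphabet
theorem pvTableau_row (r : Nat) (hr : r < 26) :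
    PySem.List.pyGetD pvTableau ((r : Nat) : Int) [] = pvKRY.drop r ++ pvKRY.take r := by
  have := PySem.List.pyGetD_map_pyRange
    (fun i => PySem.List.slice pvKRY (some i) none ++ PySem.List.slice pvKRY none (some i))
    26 r ([] : List Char) hr
  rw [pvTableau]
  simpa [PySem.List.slice_from_natCast, PySem.List.slice_to_natCast] using this

-- membership in any rotation of the alphabet is membership in the alphabet
theorem mem_rot (r : Nat) (c : Char) : c ∈ pvKRY.drop r ++ pvKRY.take r ↔ c ∈ pvKRY := by
  constructor <;> intro h
  · rcases List.mem_append.1 h with h | h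
    · exact List.mem_of_mem_drop h
    · exact List.mem_of_mem_take h
  · have : c ∈ pvKRY.take r ++ pvKRY.drop r := by rw [List.take_append_drop]; exact h
    rcases List.mem_append.1 this with h | h
    · exact List.mem_append.2 (Or.inr h)
    · exact List.mem_append.2 (Or.inl h)

-- the per-character computations agree when both characters are in the alphabet (finite check)
def pvChk : Bool := pvKRY.all fun kc => pvKRY.all fun c =>
    (PySem.List.pyGetD pvKRY
      (((PySem.List.index?
          (PySem.List.pyGetD pvTableau ((((PySem.List.index? pvKRY kc).getD 0 : Nat)) : Int) []) c).getD 0 : Nat) : Int) ' ')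
    == PySem.List.pyGetD pvKRY
        (PySem.Int.mod (((PySem.List.index? pvKRY c).getD 0 : Int) - ((PySem.List.index? pvKRY kc).getD 0 : Nat)) 26) ' '

set_option maxRecDepth 4000 in
theorem pvChk_true : pvChk = true := by decide

theorem step_char_eq : ∀ kc ∈ pvKRY, ∀ c ∈ pvKRY,
    (PySem.List.pyGetD pvKRY
      (((PySem.List.index?
          (PySem.List.pyGetD pvTableau ((((PySem.List.index? pvKRY kc).getD 0 : Nat)) : Int) []) c).getD 0 : Nat) : Int) ' ')
    = PySem.List.pyGetD pvKRY
        (PySem.Int.mod (((PySem.List.index? pvKRY c).getD 0 : Int) - ((PySem.List.index? pvKRY kc).getD 0 : Nat)) 26) ' ' := by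
  have h := pvChk_true
  simp only [pvChk, List.all_eq_true, beq_iff_eq] at h
  exact h

-- the two step functions agree on valid key characters
theorem step_eq (key : List Char) (acc : List Char) (ic : Int × Char)
    (hkc : PySem.List.pyGetD key (PySem.Int.mod ic.1 (key.length : Int)) ' ' ∈ pvKRY) :
    pvStepA key acc ic = pvStepB key acc ic := by
  set kc := PySem.List.pyGetD key (PySem.Int.mod ic.1 (key.length : Int)) ' ' with hkcdef
  have hidx : (PySem.List.index? pvKRY kc).isSome := (PySem.List.index?_isSome_iff _ _).2 hkc
  set r := (PySem.List.index? pvKRY kc).getD 0 with hrdef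
  have hr26 : r < 26 := by
    rcases Option.isSome_iff_exists.1 hidx with ⟨k, hk⟩
    rcases PySem.List.getElem_of_index?_eq_some hk with ⟨hklt, _, _⟩
    simp only [hrdef, hk, Option.getD_some]
    simpa [pvKRY] using hklt
  have hrow : PySem.List.pyGetD pvTableau ((r : Nat) : Int) [] = pvKRY.drop r ++ pvKRY.take r :=
    pvTableau_row r hr26
  unfold pvStepA pvStepB
  simp only [← hkcdef, ← hrdef, hrow]
  by_cases hc : ic.2 ∈ pvKRY
  · rw [if_pos ((mem_rot r ic.2).2 hc), if_pos hc]
    have := step_char_eq kc hkc ic.2 hc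
    rw [← hrdef] at this
    rw [hrow] at this
    simp only [this]
  · rw [if_neg (fun h => hc ((mem_rot r ic.2).1 h)), if_neg hc]

-- the folds agree: each step appends the same character, provided all used key chars are valid
theorem foldl_eq (key : List Char) :
    ∀ (l : List (Int × Char)) (acc : List Char),
      (∀ p ∈ l, PySem.List.pyGetD key (PySem.Int.mod p.1 (key.length : Int)) ' ' ∈ pvKRY) →
      l.foldl (pvStepA key) acc = l.foldl (pvStepB key) acc := by
  intro l
  induction l with
  | nil => intro acc _; rfl
  | cons p t ih =>
    intro acc h
    simp only [List.foldl_cons]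
    rw [step_eq key acc p (h p (List.mem_cons_self))]
    exact ih _ (fun q hq => h q (List.mem_cons_of_mem _ hq))

-- a used key character is among the first min(len ct, len key) key characters
theorem used_key_mem (key : List Char) (n : Nat) (hkey : key ≠ [])
    (hall : ∀ c ∈ key.take n, c ∈ pvKRY) (i : Nat) (hi : i < n) :
    PySem.List.pyGetD key (PySem.Int.mod (i : Int) (key.length : Int)) ' ' ∈ pvKRY := by
  have hL : 0 < key.length := List.length_pos_iff.2 hkey
  have hmod : PySem.Int.mod (i : Int) (key.length : Int) = ((i % key.length : Nat) : Int) :=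
    PySem.Int.mod_natCast i key.length
  rw [hmod, PySem.List.pyGetD_natCast]
  have hlt : i % key.length < key.length := Nat.mod_lt _ hL
  have hgetD : key.getD (i % key.length) ' ' = key[i % key.length] := List.getD_eq_getElem _ _ hlt
  rw [hgetD]
  have hjn : i % key.length < n := by
    rcases Nat.lt_or_ge n key.length with h | h
    · rwa [Nat.mod_eq_of_lt (lt_trans hi h)]
    · exact lt_of_lt_of_le hlt h
  have : key[i % key.length] = (key.take n)[i % key.length]'(by
      rw [List.length_take]; exact lt_min hjn hlt) := by
    rw [List.getElem_take]
  rw [this]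
  exact hall _ (List.getElem_mem _)

-- ===== VERDICT (by name: the statement is the Claim_ definition above) =====
theorem decrypt_quagmire_spec : Claim_equal_decrypt_quagmire := by
  intro ct ks _ hpre
  unfold Spec_decrypt_quagmire decrypt_quagmire decrypt_quagmire_alt
  rcases hpre with hct | ⟨hks, hall⟩
  · rw [hct]; rfl
  · congr 1
    apply foldl_eq ks.toList
    intro p hp
    rcases (PySem.List.mem_enumerate_iff _ _ _).1 hp with ⟨k, hk, hpk⟩
    rw [hpk]
    have hall' : ∀ c ∈ ks.toList.take ct.toList.length, c ∈ pvKRY := by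
      intro c hc
      have := List.all_eq_true.1 hall c hc
      exact List.contains_iff_mem.1 this
    simpa using used_key_mem ks.toList ct.toList.length hks hall' k hk
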